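-- pv_equiv track=rewrite | github.com/Mariius/mein_Praktikum | ee-logic-tools/lib/bit_handling.py | split_bin_str
-- ===== SOURCE A (Python) =====
-- def split_bin_str(value:str) -> list[str]:
--     ''' Split binary string into sequences
--
--     Needed to manipulate jtag sequences
--
--     # Parameter
--     - value: string (can start with or without '0b')
--
--     # Examples
--     >>> split_bin_str('1000000111101')
--     ['1', '0000001', '111', '01']
--
--     >>> split_bin_str('000000111101')
--     ['0000001', '111', '01']
--     '''
--     # init output
--     output = ['']
--     # init next split flag
--     split_on_next = False
--     # init split index
--     split_index = 0
--     # read input lengt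
--     input_length = len(value)
--     # loop over all values
--     for i in range(len(value)):
--         # add to current splitted
--         output[split_index] += value[i]
--         # if not the end reached
--         if i < input_length-1:
--             if split_on_next == True:
--                 # split: increment index
--                 split_index += 1
--                 output.append('')
--                 # reset flag
--                 split_on_next = False
--             # if next sign is not equal to the current sign
--             elif value[i] != value[i+1]:
--                 # in case of a 0 section add the next tms 1 to the current section and set the flag to split on next time
--                 if value[i] == '0' and value[i+1] == '1':
--                     split_on_next = True
--                 else:
--                     # split: increment index
--                     split_index += 1
--                     output.append('')
--     return output
-- ===== SOURCE B (Python) =====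
-- def split_bin_str(value: str) -> list[str]:
--     ''' Split binary string into sequences (group-then-transform re-implementation). '''
--     if not value:
--         return ['']
--     # first pass: maximal runs of equal characters
--     runs = []
--     i = 0
--     n = len(value)
--     while i < n:
--         j = i
--         while j < n and value[j] == value[i]:
--             j += 1
--         runs.append((value[i], value[i:j]))
--         i = j
--     # second pass: a '0'-run followed by a '1'-run absorbs the first '1';
--     # the '1'-run keeps its remainder only if nonempty
--     out = []
--     prev = None
--     for k, (c, s) in enumerate(runs):
--         nxt = runs[k + 1][0] if k + 1 < len(runs) else None
--         if c == '0' and nxt == '1':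
--             out.append(s + '1')
--         elif c == '1' and prev == '0':
--             if len(s) > 1:
--                 out.append(s[1:])
--         else:
--             out.append(s)
--         prev = c
--     return out
-- ===== Notes on version B (the rewrite author's own statement) =====
-- stated objective: alternative
-- what changed: Replaced A's single-pass split-on-next flag state machine with a two-pass group-then-transform: first build the maximal equal-character runs, then emit one group per run ('0'-run before a '1'-run absorbs the first '1'; that '1'-run keeps only its nonempty remainder).
import Mathlib
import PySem

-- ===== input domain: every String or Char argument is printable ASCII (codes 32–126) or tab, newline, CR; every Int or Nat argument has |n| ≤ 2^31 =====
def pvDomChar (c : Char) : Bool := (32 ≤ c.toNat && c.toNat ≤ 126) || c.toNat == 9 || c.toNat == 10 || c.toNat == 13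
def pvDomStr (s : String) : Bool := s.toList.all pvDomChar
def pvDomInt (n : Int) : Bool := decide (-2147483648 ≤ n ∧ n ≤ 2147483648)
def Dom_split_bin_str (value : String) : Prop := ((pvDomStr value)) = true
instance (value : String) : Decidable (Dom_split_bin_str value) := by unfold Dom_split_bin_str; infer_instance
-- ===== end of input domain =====

-- B replaces A's single-pass split-on-next flag state machine by a group-then-transform
-- two-pass (maximal equal-character runs, then one group emitted per run); objective: alternative.

-- ===== PORT A =====
-- Strings are handled as List Char (PySem convention); groups become String via String.ofList
-- only at the very end.  The loop state is (output, split_index, split_on_next) exactly as in A;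
-- split_index is always ≥ 0, so .toNat is exact; i ranges over valid indices of v, so getD's
-- default is never read.
def split_bin_str (value : String) : List String :=
  let v := value.toList
  let n : Int := (v.length : Int)
  let final :=
    (PySem.List.pyRange 0 n).foldl
      (fun (st : List (List Char) × Int × Bool) (i : Int) =>
        let output := st.1
        let si := st.2.1
        let son := st.2.2
        -- output[split_index] += value[i]
        let output := output.modify si.toNat (fun g => g ++ [v.getD i.toNat ' '])
        if i < n - 1 then
          if son = true then
            (output ++ [[]], si + 1, false)
          else if v.getD i.toNat ' ' ≠ v.getD (i.toNat + 1) ' ' then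
            if v.getD i.toNat ' ' = '0' ∧ v.getD (i.toNat + 1) ' ' = '1' then
              (output, si, true)
            else
              (output ++ [[]], si + 1, false)
          else (output, si, son)
        else (output, si, son))
      ([[]], (0 : Int), false)
  final.1.map (fun g => String.ofList g)

-- ===== PORT B =====
-- first pass of Source B: the list of maximal runs of equal characters (char, run string)
def pvRunsOf : List Char → List (Char × List Char)
  | [] => []
  | c :: t => (c, c :: t.takeWhile (· == c)) :: pvRunsOf (t.dropWhile (· == c))
termination_by l => l.length
decreasing_by
  simpa using Nat.lt_succ_of_le (List.length_dropWhile_le (· == c) t)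

-- second pass of Source B: loop over the runs keeping the previous run's char, looking ahead one run
def pvEmitRuns : Option Char → List (Char × List Char) → List (List Char)
  | _, [] => []
  | prev, (c, s) :: rest =>
    let nxt : Option Char := rest.head?.map Prod.fst
    if c = '0' ∧ nxt = some '1' then
      (s ++ ['1']) :: pvEmitRuns (some c) rest
    else if c = '1' ∧ prev = some '0' then
      (if s.length > 1 then [s.drop 1] else []) ++ pvEmitRuns (some c) rest
    else
      s :: pvEmitRuns (some c) rest

def split_bin_str_alt (value : String) : List String :=
  let v := value.toList
  if v = [] then [""]
  else (pvEmitRuns none (pvRunsOf v)).map (fun g => String.ofList g)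

-- ===== PRECONDITION & SPEC =====
def Spec_split_bin_str (value : String) (out : List String) : Prop := out = split_bin_str_alt value
instance (value : String) (out : List String) : Decidable (Spec_split_bin_str value out) := by unfold Spec_split_bin_str; infer_instance

-- ===== CLAIM (what is proved, stated in full; the proofs are below) =====
def Claim_equal_split_bin_str : Prop := ∀ (value : String), Dom_split_bin_str value → Spec_split_bin_str value (split_bin_str value)

-- ===== LEMMAS AND PROOFS =====

-- recursive characterization of A's loop: groups already finished are accumulated outside,
-- cur is the group under construction, the Bool is split_on_next
def pvLoopA : List Char → List Char → Bool → List (List Char)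
  | [], cur, _ => [cur]
  | [c], cur, _ => [cur ++ [c]]
  | c :: d :: t, cur, son =>
    if son then (cur ++ [c]) :: pvLoopA (d :: t) [] false
    else if c ≠ d then
      if c = '0' ∧ d = '1' then pvLoopA (d :: t) (cur ++ [c]) true
      else (cur ++ [c]) :: pvLoopA (d :: t) [] false
    else pvLoopA (d :: t) (cur ++ [c]) son

lemma pv_modify_last (done : List (List Char)) (cur : List Char) (f : List Char → List Char) :
    (done ++ [cur]).modify done.length f = done ++ [f cur] := by
  rw [List.modify_eq_set_getElem?]
  simp

lemma pv_dropWhile_head_false {p : Char → Bool} {l : List Char} {c : Char} {t : List Char}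
    (h : l.dropWhile p = c :: t) : p c = false := by
  induction l with
  | nil => simp at h
  | cons a l ih =>
    by_cases hp : p a
    · exact ih (by simpa [List.dropWhile, hp] using h)
    · rw [List.dropWhile_cons_of_neg hp] at h
      cases h; simpa using hp

-- the fold of port A, in invariant form
lemma pvA_inv (v : List Char) :
    ∀ (t : List Char) (k : Int), 0 ≤ k → v.drop k.toNat = t →
    ∀ (done : List (List Char)) (cur : List Char) (son : Bool),
    ((PySem.List.pyRange k (v.length : Int)).foldl
      (fun (st : List (List Char) × Int × Bool) (i : Int) =>
        let output := st.1
        let si := st.2.1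
        let son := st.2.2
        let output := output.modify si.toNat (fun g => g ++ [v.getD i.toNat ' '])
        if i < (v.length : Int) - 1 then
          if son = true then
            (output ++ [[]], si + 1, false)
          else if v.getD i.toNat ' ' ≠ v.getD (i.toNat + 1) ' ' then
            if v.getD i.toNat ' ' = '0' ∧ v.getD (i.toNat + 1) ' ' = '1' then
              (output, si, true)
            else
              (output ++ [[]], si + 1, false)
          else (output, si, son)
        else (output, si, son))
      (done ++ [cur], (done.length : Int), son)).1
    = done ++ pvLoopA t cur son := by
  intro t
  induction t with
  | nil =>
    intro k hk0 ht done cur son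
    have hlen : v.length ≤ k.toNat := by
      have := congrArg List.length ht
      simp [List.length_drop] at this
      omega
    rw [PySem.List.pyRange_one_eq_nil (by omega)]
    rfl
  | cons c t' ih =>
    intro k hk0 ht done cur son
    have hklt : k.toNat < v.length := by
      by_contra hge
      rw [List.drop_eq_nil_of_le (by omega)] at ht
      simp at ht
    have hgetc : v.getD k.toNat ' ' = c := by
      have h0 : (v.drop k.toNat)[0]? = some c := by rw [ht]; rfl
      rw [List.getElem?_drop] at h0
      simp at h0
      simp [List.getD_eq_getElem?_getD, h0]
    have hdrop1 : v.drop (k.toNat + 1) = t' := by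
      rw [← List.tail_drop, ht]; rfl
    have hlen2 : v.length = k.toNat + t'.length + 1 := by
      have := congrArg List.length ht
      simp [List.length_drop] at this
      omega
    rw [PySem.List.pyRange_one_cons (by omega), List.foldl_cons]
    simp only [Int.toNat_natCast, pv_modify_last, hgetc]
    cases t' with
    | nil =>
      have hl1 : v.length = k.toNat + 1 := by simpa using hlen2
      rw [if_neg (by omega)]
      rw [PySem.List.pyRange_one_eq_nil (by omega)]
      simp [pvLoopA]
    | cons d t'' =>
      have hl2 : v.length = k.toNat + t''.length + 2 := by
        simp at hlen2; omega
      have hgetd : v.getD (k.toNat + 1) ' ' = d := by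
        have h0 : (v.drop (k.toNat + 1))[0]? = some d := by rw [hdrop1]; rfl
        rw [List.getElem?_drop] at h0
        simp [List.getD_eq_getElem?_getD, h0]
      rw [if_pos (by omega), hgetd]
      have hk1 : ((k + 1 : Int)).toNat = k.toNat + 1 := by omega
      cases son with
      | true =>
        rw [if_pos rfl]
        have happ : done ++ [cur ++ [c]] ++ [[]]
            = (done ++ [cur ++ [c]]) ++ [([] : List Char)] := by simp
        have hsi : ((done.length : Int) + 1) = ((done ++ [cur ++ [c]]).length : Int) := by
          simp
        rw [happ, hsi, ih (k + 1) (by omega) (by rw [hk1]; exact hdrop1)]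
        simp [pvLoopA]
      | false =>
        rw [if_neg (by simp)]
        by_cases hcd : c = d
        · rw [if_neg (by simp [hcd])]
          rw [ih (k + 1) (by omega) (by rw [hk1]; exact hdrop1)]
          simp [pvLoopA, hcd]
        · rw [if_pos (by simp [hcd])]
          by_cases h01 : c = '0' ∧ d = '1'
          · rw [if_pos h01]
            rw [ih (k + 1) (by omega) (by rw [hk1]; exact hdrop1)]
            simp [pvLoopA, h01]
          · rw [if_neg h01]
            have hsi : ((done.length : Int) + 1) = ((done ++ [cur ++ [c]]).length : Int) := by
              simp
            rw [show done ++ [cur ++ [c]] ++ [[]]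
                  = (done ++ [cur ++ [c]]) ++ [([] : List Char)] from by simp,
                hsi, ih (k + 1) (by omega) (by rw [hk1]; exact hdrop1)]
            simp [pvLoopA, hcd, h01]

lemma pvA_eq_loopA (value : String) :
    split_bin_str value = (pvLoopA value.toList [] false).map (fun g => String.ofList g) := by
  unfold split_bin_str
  have h := pvA_inv value.toList value.toList 0 le_rfl (by simp) [] [] false
  simpa using congrArg (List.map (fun g => String.ofList g)) h

-- consuming one maximal run with the flag down
lemma pvRun_lemma : ∀ (t cur : List Char) (c : Char),
    pvLoopA (c :: t) cur false =
      match t.dropWhile (· == c) with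
      | [] => [cur ++ c :: t.takeWhile (· == c)]
      | d :: t2 =>
        if c = '0' ∧ d = '1' then
          pvLoopA (d :: t2) (cur ++ c :: t.takeWhile (· == c)) true
        else (cur ++ c :: t.takeWhile (· == c)) :: pvLoopA (d :: t2) [] false := by
  intro t
  induction t with
  | nil => intro cur c; simp [pvLoopA]
  | cons e t ih =>
    intro cur c
    by_cases hec : e = c
    · have h1 : pvLoopA (c :: e :: t) cur false = pvLoopA (e :: t) (cur ++ [c]) false := by
        simp [pvLoopA, hec]
      rw [h1, hec, ih]
      simp only [List.dropWhile_cons, List.takeWhile_cons, beq_self_eq_true, if_true]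
      cases hd : t.dropWhile (· == c) with
      | nil => simp
      | cons d t2 => by_cases h01 : d = '1' <;> by_cases hc0 : c = '0' <;> simp [h01, hc0]
    · have htw : (e :: t).takeWhile (· == c) = [] := by
        simp [hec]
      have hdw : (e :: t).dropWhile (· == c) = e :: t := by
        simp [hec]
      rw [htw, hdw]
      have h1 : pvLoopA (c :: e :: t) cur false =
          if c = '0' ∧ e = '1' then pvLoopA (e :: t) (cur ++ [c]) true
          else (cur ++ [c]) :: pvLoopA (e :: t) [] false := by
        simp [pvLoopA, Ne.symm hec]
      rw [h1]

-- one step with the flag up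
lemma pvFlag_lemma (d : Char) (t : List Char) (cur : List Char) :
    pvLoopA (d :: t) cur true =
      match t with
      | [] => [cur ++ [d]]
      | _ :: _ => (cur ++ [d]) :: pvLoopA t [] false := by
  cases t with
  | nil => rfl
  | cons e t2 => simp [pvLoopA]

lemma pv_head_runsOf (l : List Char) : (pvRunsOf l).head?.map Prod.fst = l.head? := by
  cases l with
  | nil => simp [pvRunsOf]
  | cons c t => simp [pvRunsOf]

-- main through-the-runs equivalence
lemma pvMain : ∀ (n : Nat) (v : List Char) (p : Option Char), v.length ≤ n → v ≠ [] →
    ¬(p = some '0' ∧ v.headD ' ' = '1') →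
    pvLoopA v [] false = pvEmitRuns p (pvRunsOf v) := by
  intro n
  induction n with
  | zero => intro v p hlen hne; cases v <;> simp_all
  | succ n ihn =>
    intro v p hlen hne hp
    obtain ⟨c, t, rfl⟩ : ∃ c t, v = c :: t := by
      cases v with | nil => exact absurd rfl hne | cons c t => exact ⟨c, t, rfl⟩
    have hlt : t.length ≤ n := by simpa using hlen
    rw [pvRun_lemma t [] c]
    rw [show pvRunsOf (c :: t)
          = (c, c :: t.takeWhile (· == c)) :: pvRunsOf (t.dropWhile (· == c)) from by
        rw [pvRunsOf]]
    cases hd : t.dropWhile (· == c) with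
    | nil =>
      have hc1 : ¬(c = '1' ∧ p = some '0') := fun ⟨h1, h0⟩ => hp ⟨h0, by simp [h1]⟩
      simp [pvEmitRuns, pv_head_runsOf]
      rw [if_neg hc1]
      simp [pvRunsOf, pvEmitRuns]
    | cons d t2 =>
      have hdc : d ≠ c := by
        have := pv_dropWhile_head_false hd; simpa using this
      have hlen2 : t2.length + 1 ≤ n := by
        have h1 := List.length_dropWhile_le (· == c) t
        rw [hd] at h1; simp at h1; omega
      have hnxt : (pvRunsOf (t.dropWhile (· == c))).head?.map Prod.fst = some d := by
        rw [pv_head_runsOf, hd]; rfl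
      by_cases h01 : c = '0' ∧ d = '1'
      · obtain ⟨hc0, hd1⟩ := h01
        subst hc0; subst hd1
        simp only []
        rw [pvFlag_lemma]
        rw [show pvEmitRuns p (('0', '0' :: t.takeWhile (· == '0')) :: pvRunsOf ('1' :: t2))
              = (('0' :: t.takeWhile (· == '0')) ++ ['1'])
                  :: pvEmitRuns (some '0') (pvRunsOf ('1' :: t2)) from by
          rw [pvEmitRuns]; simp [pvRunsOf]]
        rw [show pvRunsOf ('1' :: t2)
              = ('1', '1' :: t2.takeWhile (· == '1')) :: pvRunsOf (t2.dropWhile (· == '1')) from by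
            rw [pvRunsOf]]
        rw [show pvEmitRuns (some '0')
              (('1', '1' :: t2.takeWhile (· == '1')) :: pvRunsOf (t2.dropWhile (· == '1')))
              = (if ('1' :: t2.takeWhile (· == '1')).length > 1
                  then [t2.takeWhile (· == '1')] else [])
                ++ pvEmitRuns (some '1') (pvRunsOf (t2.dropWhile (· == '1'))) from by
          rw [pvEmitRuns]; simp]
        simp only [and_self, if_true]
        cases t2 with
        | nil => simp [pvEmitRuns, pvRunsOf]
        | cons e t3 =>
          have hrec : pvLoopA (e :: t3) [] false
              = pvEmitRuns (some '1') (pvRunsOf (e :: t3)) :=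
            ihn (e :: t3) (some '1') (by simpa using Nat.le_of_succ_le hlen2) (by simp) (by simp)
          rw [hrec]
          by_cases he1 : e = '1'
          · subst he1
            rw [show pvRunsOf ('1' :: t3)
                  = ('1', '1' :: t3.takeWhile (· == '1')) :: pvRunsOf (t3.dropWhile (· == '1')) from by
                rw [pvRunsOf]]
            rw [show pvEmitRuns (some '1')
                  (('1', '1' :: t3.takeWhile (· == '1')) :: pvRunsOf (t3.dropWhile (· == '1')))
                  = ('1' :: t3.takeWhile (· == '1'))
                      :: pvEmitRuns (some '1') (pvRunsOf (t3.dropWhile (· == '1'))) from by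
              rw [pvEmitRuns]; simp]
            simp
          · simp [he1]
      · have hrec : pvLoopA (d :: t2) [] false
            = pvEmitRuns (some c) (pvRunsOf (d :: t2)) :=
          ihn (d :: t2) (some c) (by simpa using hlen2) (by simp)
            (by intro hcc; exact h01 (by simpa using hcc))
        simp only []
        rw [if_neg h01, hrec, ← hd]
        rw [show pvEmitRuns p ((c, c :: t.takeWhile (· == c)) :: pvRunsOf (t.dropWhile (· == c)))
              = (c :: t.takeWhile (· == c))
                  :: pvEmitRuns (some c) (pvRunsOf (t.dropWhile (· == c))) from by
          rw [pvEmitRuns]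
          simp only [hnxt]
          rw [if_neg (by simpa using h01),
              if_neg (fun h => hp ⟨h.2, by simp [h.1]⟩)]]
        simp

-- ===== VERDICT (by name: the statement is the Claim_ definition above) =====
theorem split_bin_str_spec : Claim_equal_split_bin_str := by
  intro value _
  unfold Spec_split_bin_str split_bin_str_alt
  rw [pvA_eq_loopA]
  cases hv : value.toList with
  | nil => simp [pvLoopA]
  | cons c t =>
    simp only [reduceCtorEq, if_false]
    congr 1
    exact pvMain (c :: t).length (c :: t) none le_rfl (by simp) (by simp)
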